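-- pv_equiv track=rewrite | github.com/TeamW-P/RNABayesPairing2 | bayespairing/src/map_PDB_to_Rfam.py | get_bps_from_ss
-- ===== SOURCE A (Python) =====
-- def get_bps_from_ss(ss, columns):
--     starts = []
--     ends = []
--     ss=list(ss)
--     for i in range(len(list(ss))):
--         if ss[i]=="(" or ss[i]=="<" or ss[i]=="{":
--             starts.append(i)
--         if ss[i]==")" or ss[i]==">" or ss[i]=="}":
--             ends.append(i)
--     ends.reverse()
--     #struct = [(columns[starts[i]],columns[ends[i]]) for i in range(min(len(starts),len(ends)))]
--     if min(len(starts),len(ends))==0: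
--         return ()
--     else:
--         struct = [(starts[i],ends[i]) for i in range(min(len(starts),len(ends)))]
--         return struct
-- ===== SOURCE B (Python) =====
-- def get_bps_from_ss(ss, columns):
--     pairs = []
--     l, r = 0, len(ss) - 1
--     while True:
--         while l < len(ss) and ss[l] not in "(<{":
--             l += 1
--         while r >= 0 and ss[r] not in ")>}":
--             r -= 1
--         if l >= len(ss) or r < 0:
--             break
--         pairs.append((l, r))
--         l += 1
--         r -= 1
--     return pairs if pairs else ()
-- ===== Notes on version B (the rewrite author's own statement) =====
-- stated objective: alternative
-- what changed: Replaces A's collect-all-openers/collect-all-closers passes plus reverse and index-zip with a simultaneous two-pointer inward scan that emits each (i-th opener from the left, i-th closer from the right) pair directly and stops when either pointer runs off the string.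
import Mathlib
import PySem

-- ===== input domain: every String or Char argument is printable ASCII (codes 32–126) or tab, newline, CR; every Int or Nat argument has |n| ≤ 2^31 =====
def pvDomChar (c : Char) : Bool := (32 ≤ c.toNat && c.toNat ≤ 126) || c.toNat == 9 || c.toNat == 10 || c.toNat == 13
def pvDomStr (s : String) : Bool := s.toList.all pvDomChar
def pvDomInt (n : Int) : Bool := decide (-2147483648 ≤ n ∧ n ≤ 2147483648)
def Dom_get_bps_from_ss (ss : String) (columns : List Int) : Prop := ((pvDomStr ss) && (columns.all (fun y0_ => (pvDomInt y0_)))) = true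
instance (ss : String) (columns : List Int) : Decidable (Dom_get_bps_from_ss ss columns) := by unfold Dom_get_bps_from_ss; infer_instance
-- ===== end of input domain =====

-- B replaces A's two collect-then-zip passes by a simultaneous two-pointer inward scan (alternative decomposition, same asymptotics).
-- Python () and [] for the no-pair case both map to the empty Lean list.

-- ===== PORT A =====
-- literal port of A: collect opener and closer indices in one indexed loop, reverse the
-- closers, pair the first min(len,len) of each (ss[i] is always in range, so pyGetD is exact)
def pvStepA (cs : List Char) (st : List Int × List Int) (i : Int) : List Int × List Int :=
  let c := PySem.List.pyGetD cs i ' '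
  let st1 := if c == '(' || c == '<' || c == '{' then (st.1 ++ [i], st.2) else st
  if c == ')' || c == '>' || c == '}' then (st1.1, st1.2 ++ [i]) else st1

def get_bps_from_ss (ss : String) (columns : List Int) : List (Int × Int) :=
  let cs := ss.toList
  let p := (PySem.List.pyRange 0 (cs.length : Int) 1).foldl (pvStepA cs) ([], [])
  let starts := p.1
  let ends := p.2.reverse
  if min starts.length ends.length = 0 then []
  else (PySem.List.pyRange 0 ((min starts.length ends.length : Nat) : Int) 1).map
    (fun i => (PySem.List.pyGetD starts i 0, PySem.List.pyGetD ends i 0))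

-- ===== PORT B =====
-- B's inner `while l < len(ss) and ss[l] not in "(<{"` loop: advance l to the next opener
def pvFindOpen (cs : List Char) (l : Nat) : Option Nat :=
  if h : l < cs.length then
    if cs[l] == '(' || cs[l] == '<' || cs[l] == '{' then some l
    else pvFindOpen cs (l + 1)
  else none
termination_by cs.length - l
decreasing_by omega

theorem pvFindOpen_bounds (cs : List Char) (l a : Nat) (h : pvFindOpen cs l = some a) :
    l ≤ a ∧ a < cs.length := by
  induction l using pvFindOpen.induct cs with
  | case1 l hl hc => rw [pvFindOpen] at h; simp [hl, hc] at h; omega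
  | case2 l hl hc ih =>
      rw [pvFindOpen] at h; simp [hl, hc] at h
      have := ih h; omega
  | case3 l hl => rw [pvFindOpen] at h; simp [hl] at h

-- B's inner `while r >= 0 and ss[r] not in ")>}"` loop: move r back to the previous closer
def pvFindClose (cs : List Char) (r : Int) : Option Int :=
  if h : 0 ≤ r then
    if cs.getD r.toNat ' ' == ')' || cs.getD r.toNat ' ' == '>' || cs.getD r.toNat ' ' == '}' then some r
    else pvFindClose cs (r - 1)
  else none
termination_by (r + 1).toNat
decreasing_by omega

-- B's outer loop: append the found (l, r) pair and continue inward with l+1, r-1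
def pvScan (cs : List Char) (l : Nat) (r : Int) : List (Int × Int) :=
  match h1 : pvFindOpen cs l, pvFindClose cs r with
  | some a, some b => ((a : Int), b) :: pvScan cs (a + 1) (b - 1)
  | _, _ => []
termination_by cs.length - l
decreasing_by have := pvFindOpen_bounds cs l _ h1; omega

def get_bps_from_ss_alt (ss : String) (columns : List Int) : List (Int × Int) :=
  let cs := ss.toList
  pvScan cs 0 ((cs.length : Int) - 1)

-- ===== PRECONDITION & SPEC =====
def Spec_get_bps_from_ss (ss : String) (columns : List Int) (out : List (Int × Int)) : Prop := out = get_bps_from_ss_alt ss columns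
instance (ss : String) (columns : List Int) (out : List (Int × Int)) : Decidable (Spec_get_bps_from_ss ss columns out) := by unfold Spec_get_bps_from_ss; infer_instance

-- ===== CLAIM (what is proved, stated in full; the proofs are below) =====
def Claim_equal_get_bps_from_ss : Prop := ∀ (ss : String) (columns : List Int), Dom_get_bps_from_ss ss columns → Spec_get_bps_from_ss ss columns (get_bps_from_ss ss columns)

-- ===== LEMMAS AND PROOFS =====

def pvIsOpen (c : Char) : Bool := c == '(' || c == '<' || c == '{'
def pvIsClose (c : Char) : Bool := c == ')' || c == '>' || c == '}'

/-- opener indices `≥ l` in increasing order -/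
def pvOpensFrom (cs : List Char) (l : Nat) : List Nat :=
  (List.range' l (cs.length - l)).filter (fun i => pvIsOpen (cs[i]?.getD ' '))

/-- closer indices `< r` in increasing order -/
def pvClosesUpto (cs : List Char) (r : Nat) : List Nat :=
  (List.range r).filter (fun i => pvIsClose (cs[i]?.getD ' '))

/-- Nat-counter version of pvFindClose: last closer index `< r` -/
def pvClosesFind (cs : List Char) : Nat → Option Nat
  | 0 => none
  | r + 1 => if pvIsClose (cs[r]?.getD ' ') then some r else pvClosesFind cs r

theorem pvFindClose_bridge (cs : List Char) (r : Nat) :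
    pvFindClose cs ((r : Int) - 1) = (pvClosesFind cs r).map (fun (b : Nat) => (b : Int)) := by
  induction r with
  | zero => rw [pvFindClose]; simp [pvClosesFind]
  | succ r ih =>
      rw [pvFindClose]
      have h0 : (0 : Int) ≤ (r + 1 : Nat) - 1 := by push_cast; omega
      have ht : (((r + 1 : Nat) : Int) - 1).toNat = r := by omega
      have hgd : cs.getD r ' ' = cs[r]?.getD ' ' := List.getD_eq_getElem?_getD
      simp only [h0, dif_pos, ht, hgd, pvClosesFind, pvIsClose]
      split_ifs with hc
      · simp only [Option.map_some, Option.some.injEq]; omega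
      · have h2 : ((r + 1 : Nat) : Int) - 1 - 1 = (r : Int) - 1 := by push_cast; ring
        rw [h2, ih]

theorem pvOpensFrom_step (cs : List Char) (l : Nat) :
    pvOpensFrom cs l =
      match pvFindOpen cs l with
      | none => []
      | some a => a :: pvOpensFrom cs (a + 1) := by
  induction l using pvFindOpen.induct cs with
  | case1 l hl hc =>
      rw [pvFindOpen]
      have hlen : cs.length - l = (cs.length - (l + 1)) + 1 := by omega
      have hval : cs[l]?.getD ' ' = cs[l] := by simp [List.getElem?_eq_getElem hl]
      have hget : pvIsOpen (cs[l]?.getD ' ') = true := by rw [hval]; simpa [pvIsOpen] using hc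
      simp only [hl, dif_pos, hc, if_pos]
      simp [pvOpensFrom, hlen, List.range'_succ, hget]
  | case2 l hl hc ih =>
      rw [pvFindOpen]
      have hlen : cs.length - l = (cs.length - (l + 1)) + 1 := by omega
      have hval : cs[l]?.getD ' ' = cs[l] := by simp [List.getElem?_eq_getElem hl]
      have hget : pvIsOpen (cs[l]?.getD ' ') = false := by rw [hval]; simpa [pvIsOpen] using hc
      simp only [hl, dif_pos, hc, if_neg, Bool.false_eq_true, not_false_iff]
      rw [← ih]
      simp [pvOpensFrom, hlen, List.range'_succ, hget]
  | case3 l hl =>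
      rw [pvFindOpen]
      have : cs.length - l = 0 := by omega
      simp [hl, pvOpensFrom, this]

theorem pvClosesUpto_step (cs : List Char) (r : Nat) :
    pvClosesUpto cs r =
      match pvClosesFind cs r with
      | none => []
      | some b => pvClosesUpto cs b ++ [b] := by
  induction r with
  | zero => simp [pvClosesUpto, pvClosesFind]
  | succ r ih =>
      simp only [pvClosesFind]
      split_ifs with hc
      · simp [pvClosesUpto, List.range_succ, List.filter_append, hc]
      · rw [pvClosesUpto, List.range_succ, List.filter_append, ← ih]
        simp [pvClosesUpto, hc]

theorem pvScan_eq_zip (cs : List Char) (l r : Nat) :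
    pvScan cs l ((r : Int) - 1) =
      List.zip ((pvOpensFrom cs l).map (fun (a : Nat) => (a : Int)))
               (((pvClosesUpto cs r).reverse).map (fun (b : Nat) => (b : Int))) := by
  induction hk : cs.length - l using Nat.strong_induction_on generalizing l r with
  | _ k ih =>
  rw [pvScan.eq_def]
  rcases ho : pvFindOpen cs l with _ | a
  · have hO : pvOpensFrom cs l = [] := by rw [pvOpensFrom_step, ho]
    simp [hO]
  · rw [pvFindClose_bridge]
    rcases hc : pvClosesFind cs r with _ | b
    · have hC : pvClosesUpto cs r = [] := by rw [pvClosesUpto_step, hc]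
      simp [hC]
    · have hOpen : pvOpensFrom cs l = a :: pvOpensFrom cs (a + 1) := by
        rw [pvOpensFrom_step, ho]
      have hClose : pvClosesUpto cs r = pvClosesUpto cs b ++ [b] := by
        rw [pvClosesUpto_step, hc]
      have hbd := pvFindOpen_bounds cs l a ho
      have hIH := ih (cs.length - (a + 1)) (by omega) (a + 1) b rfl
      simp only [Option.map_some]
      rw [show ((b : Int)) - 1 = ((b : Nat) : Int) - 1 from rfl] at *
      rw [hIH, hOpen, hClose]
      simp [List.zip]

theorem pvOpensFrom_zero (cs : List Char) :
    pvOpensFrom cs 0 = (List.range cs.length).filter (fun i => pvIsOpen (cs[i]?.getD ' ')) := by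
  simp [pvOpensFrom, List.range_eq_range']

theorem pvFold_char (cs : List Char) (m : Nat) :
    (List.range m).foldl (fun st (k : Nat) => pvStepA cs st (k : Int)) ([], [])
    = (((List.range m).filter (fun i => pvIsOpen (cs[i]?.getD ' '))).map (fun (a : Nat) => (a : Int)),
       ((List.range m).filter (fun i => pvIsClose (cs[i]?.getD ' '))).map (fun (a : Nat) => (a : Int))) := by
  induction m with
  | zero => simp
  | succ m ih =>
      rw [List.range_succ, List.foldl_append, List.foldl_cons, List.foldl_nil, ih]
      simp only [List.filter_append, List.map_append, List.filter_cons, List.filter_nil,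
        pvStepA, PySem.List.pyGetD_natCast, List.getD_eq_getElem?_getD]
      by_cases h1 : pvIsOpen (cs[m]?.getD ' ') <;> by_cases h2 : pvIsClose (cs[m]?.getD ' ') <;>
        simp_all [pvIsOpen, pvIsClose]

theorem pvZipEval (xs ys : List Int) :
    (PySem.List.pyRange 0 ((min xs.length ys.length : Nat) : Int) 1).map
      (fun i => (PySem.List.pyGetD xs i 0, PySem.List.pyGetD ys i 0)) = List.zip xs ys := by
  rw [PySem.List.pyRange_one]
  have hm : (((min xs.length ys.length : Nat) : Int) - 0).toNat = min xs.length ys.length := by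
    omega
  rw [hm, List.map_map]
  apply List.ext_getElem
  · simp [List.length_zip]
  · intro k h1 h2
    have hk : k < min xs.length ys.length := by simpa using h1
    simp only [List.getElem_map, List.getElem_range, Function.comp]
    have hx : ((0 : Int) + (k : Nat)) = ((k : Nat) : Int) := by ring
    rw [hx, PySem.List.pyGetD_natCast, PySem.List.pyGetD_natCast, List.getElem_zip]
    rw [List.getD_eq_getElem xs 0 (by omega), List.getD_eq_getElem ys 0 (by omega)]

theorem pvA_eq_zip (ss : String) (columns : List Int) :
    get_bps_from_ss ss columns =
      List.zip (((List.range ss.toList.length).filter (fun i => pvIsOpen (ss.toList[i]?.getD ' '))).map (fun (a : Nat) => (a : Int)))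
               ((((List.range ss.toList.length).filter (fun i => pvIsClose (ss.toList[i]?.getD ' '))).map (fun (a : Nat) => (a : Int))).reverse) := by
  have hR : PySem.List.pyRange 0 (ss.toList.length : Int) 1
      = (List.range ss.toList.length).map (fun (k : Nat) => (k : Int)) := by
    rw [PySem.List.pyRange_one]
    simp only [Int.sub_zero, Int.toNat_natCast, zero_add]
  dsimp only [get_bps_from_ss]
  rw [hR]
  simp only [List.foldl_map]
  rw [pvFold_char]
  set s := ((List.range ss.toList.length).filter (fun i => pvIsOpen (ss.toList[i]?.getD ' '))).map (fun (a : Nat) => (a : Int)) with hs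
  set e := (((List.range ss.toList.length).filter (fun i => pvIsClose (ss.toList[i]?.getD ' '))).map (fun (a : Nat) => (a : Int))).reverse with he
  split_ifs with h
  · have h' : s.length = 0 ∨ e.length = 0 := Nat.min_eq_zero_iff.mp h
    rcases h' with h' | h' <;> rw [List.length_eq_zero_iff] at h' <;> simp [h']
  · exact pvZipEval s e

-- ===== VERDICT (by name: the statement is the Claim_ definition above) =====
theorem get_bps_from_ss_spec : Claim_equal_get_bps_from_ss := by
  intro ss columns _
  unfold Spec_get_bps_from_ss
  rw [pvA_eq_zip _ columns]
  dsimp only [get_bps_from_ss_alt]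
  rw [pvScan_eq_zip ss.toList 0 ss.toList.length, pvOpensFrom_zero]
  simp only [pvClosesUpto, List.map_reverse]
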